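-- pv_equiv track=rewrite | github.com/Altynai/LeetCode | restore-the-array/answer.py | numberOfArrays
-- ===== SOURCE A (Python) =====
-- def array(a, val=None):
--     return [val for _ in range(a)]
--
-- def numberOfArrays(s: str, k: int) -> int:
--     t = [0] + list(map(int, s))
--     n = len(t)
--     dp = array(n, 0)
--     dp[0] = 1
--     mod = 1000000000 + 7
--
--     for i in range(1, n):
--         if dp[i - 1] == 0 or t[i] == 0:
--             continue
--         j, val = i, t[i]
--         while val <= k and j < n:
--             dp[j] = (dp[j] + dp[i - 1]) % mod
--             if j + 1 >= n:
--                 break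
--             val = val * 10 + t[j + 1]
--             j += 1
--     return dp[n - 1]
-- ===== SOURCE B (Python) =====
-- def numberOfArrays(s: str, k: int) -> int:
--     # backward "pull" DP: dp[i] = ways to split the first i characters; for each end i
--     # scan the start position backward, building the number from its last digit
--     mod = 10 ** 9 + 7
--     n = len(s)
--     dp = [1]
--     for i in range(1, n + 1):
--         num, p, acc = 0, 1, 0
--         for start in range(i, 0, -1):
--             num += int(s[start - 1]) * p
--             p *= 10
--             if num > k:
--                 break
--             if s[start - 1] != '0':
--                 acc = (acc + dp[start - 1]) % mod
--         dp.append(acc)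
--     return dp[n]
-- ===== Notes on version B (the rewrite author's own statement) =====
-- stated objective: alternative
-- what changed: A's forward push DP (each valid start position pushes dp[i-1] into every endpoint it can reach, scanning digits left-to-right) is replaced by a backward pull DP (each endpoint scans start positions backward, building the candidate number from its last digit upward and pulling dp[start-1] in), with the same break-on-exceeding-k pruning.
import Mathlib
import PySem

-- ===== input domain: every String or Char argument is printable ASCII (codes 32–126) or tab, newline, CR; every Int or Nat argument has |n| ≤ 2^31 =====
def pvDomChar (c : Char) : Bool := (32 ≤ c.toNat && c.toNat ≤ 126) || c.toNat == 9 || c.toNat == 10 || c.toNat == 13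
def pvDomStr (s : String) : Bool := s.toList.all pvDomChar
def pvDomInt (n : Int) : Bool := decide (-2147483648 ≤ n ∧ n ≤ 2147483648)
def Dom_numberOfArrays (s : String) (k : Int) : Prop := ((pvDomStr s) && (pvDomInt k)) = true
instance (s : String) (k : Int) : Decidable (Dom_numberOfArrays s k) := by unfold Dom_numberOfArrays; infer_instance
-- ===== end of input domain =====

-- B replaces A's forward "push" DP (each start position pushes its count into every
-- reachable endpoint) with a backward "pull" DP (each endpoint scans start positions
-- backward, building the candidate number from its last digit); objective: alternative.

-- ===== PORT A =====
-- inner `while val <= k and j < n` loop of A; dp[i-1] is re-read at every write, as in A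
def pvAInner (t : List Int) (k : Int) (n i : Nat) (j : Nat) (val : Int) (dp : List Int) : List Int :=
  if h : val ≤ k ∧ j < n then
    let dp' := dp.set j (PySem.Int.mod (dp.getD j 0 + dp.getD (i - 1) 0) 1000000007)
    if h2 : j + 1 ≥ n then dp'
    else pvAInner t k n i (j + 1) (val * 10 + t.getD (j + 1) 0) dp'
  else dp
termination_by n - j
decreasing_by omega

def numberOfArrays (s : String) (k : Int) : Int :=
  -- map(int, s): on Pre_'s all-digit strings int(c) is the char code minus 48 (exact there)
  let t : List Int := 0 :: s.toList.map (fun c => ((c.toNat : Int) - 48))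
  let n : Nat := t.length
  let dp0 : List Int := (List.replicate n (0 : Int)).set 0 1
  let dp := (List.range' 1 (n - 1)).foldl (fun dp i =>
      if dp.getD (i - 1) 0 = 0 ∨ t.getD i 0 = 0 then dp
      else pvAInner t k n i i (t.getD i 0) dp) dp0
  dp.getD (n - 1) 0

-- ===== PORT B =====
-- inner backward scan of B: first argument is the Python `start`; digit s[start-1] is d[start-1]
def pvBInner (d : List Int) (k : Int) (dp : List Int) : Nat → Int → Int → Int → Int
  | 0, _, _, acc => acc
  | st + 1, num, p, acc =>
    let dg := d.getD st 0
    let num' := num + dg * p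
    let p' := p * 10
    if num' > k then acc
    else pvBInner d k dp st num' p' (if dg = 0 then acc else PySem.Int.mod (acc + dp.getD st 0) 1000000007)

def numberOfArrays_alt (s : String) (k : Int) : Int :=
  let d : List Int := s.toList.map (fun c => ((c.toNat : Int) - 48))
  let n : Nat := d.length
  let dp := (List.range' 1 n).foldl (fun dp i => dp ++ [pvBInner d k dp i 0 1 0]) [1]
  dp.getD n 0

-- ===== PRECONDITION & SPEC =====
-- Pre_ excludes exactly the strings with a non-digit character, on which A's
-- `map(int, s)` raises ValueError.
def Pre_numberOfArrays (s : String) (k : Int) : Prop := s.toList.all Char.isDigit = true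
instance (s : String) (k : Int) : Decidable (Pre_numberOfArrays s k) := by unfold Pre_numberOfArrays; infer_instance
def pvWitness_numberOfArrays : String × Int := ("231", 1000)

def Spec_numberOfArrays (s : String) (k : Int) (out : Int) : Prop := out = numberOfArrays_alt s k
instance (s : String) (k : Int) (out : Int) : Decidable (Spec_numberOfArrays s k out) := by unfold Spec_numberOfArrays; infer_instance

-- ===== CLAIM (what is proved, stated in full; the proofs are below) =====
def Claim_equal_numberOfArrays : Prop := ∀ (s : String) (k : Int), Dom_numberOfArrays s k → Pre_numberOfArrays s k → Spec_numberOfArrays s k (numberOfArrays s k)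

-- ===== LEMMAS AND PROOFS =====

-- value of the digit block d[a..b] (empty when b+1 ≤ a), as both loops build it
def pvV (d : List Int) (a b : Nat) : Int :=
  ((d.drop a).take (b + 1 - a)).foldl (fun v dg => v * 10 + dg) 0

-- table of the split-count DP: pvFtab d k p = [F 0, …, F p],
-- F 0 = 1, F (p+1) = (Σ_{a<p+1} [d[a] ≠ 0 ∧ pvV a p ≤ k] · F a) mod 1e9+7
def pvFtab (d : List Int) (k : Int) : Nat → List Int
  | 0 => [1]
  | p + 1 =>
    let tb := pvFtab d k p
    tb ++ [PySem.Int.mod (((List.range (p + 1)).map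
      (fun a => if d.getD a 0 ≠ 0 ∧ pvV d a p ≤ k then tb.getD a 0 else 0)).sum) 1000000007]

def pvF (d : List Int) (k : Int) (p : Nat) : Int := (pvFtab d k p).getD p 0

theorem pvmod_eq (a : Int) : PySem.Int.mod a 1000000007 = a % 1000000007 :=
  PySem.Int.mod_eq_emod_of_pos (by norm_num)

theorem pvmod_add_left (a b : Int) :
    PySem.Int.mod (PySem.Int.mod a 1000000007 + b) 1000000007 = PySem.Int.mod (a + b) 1000000007 := by
  simp [pvmod_eq, Int.emod_add_emod]

theorem pvmod_idem (a : Int) :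
    PySem.Int.mod (PySem.Int.mod a 1000000007) 1000000007 = PySem.Int.mod a 1000000007 := by
  simpa using pvmod_add_left a 0

theorem pvFtab_length (d : List Int) (k : Int) (p : Nat) : (pvFtab d k p).length = p + 1 := by
  induction p with
  | zero => rfl
  | succ p ih => simp [pvFtab, ih]

theorem pvFtab_getD (d : List Int) (k : Int) {q p : Nat} (h : q ≤ p) :
    (pvFtab d k p).getD q 0 = pvF d k q := by
  induction p with
  | zero => interval_cases q; rfl
  | succ p ih =>
    rcases Nat.lt_or_ge q (p + 1) with hq | hq
    · rw [show (pvFtab d k (p+1)) = pvFtab d k p ++ [_] from rfl,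
        List.getD_append _ _ _ _ (by rw [pvFtab_length]; omega)]
      exact ih (by omega)
    · have : q = p + 1 := by omega
      subst this; rfl

theorem pvF_succ (d : List Int) (k : Int) (p : Nat) :
    pvF d k (p + 1) = PySem.Int.mod (((List.range (p + 1)).map
      (fun a => if d.getD a 0 ≠ 0 ∧ pvV d a p ≤ k then pvF d k a else 0)).sum) 1000000007 := by
  show (pvFtab d k p ++ [_]).getD (p+1) 0 = _
  rw [List.getD_append_right _ _ _ _ (by simp [pvFtab_length])]
  rw [pvFtab_length, Nat.sub_self, List.getD_cons_zero]
  congr 2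
  refine List.map_congr_left (fun a ha => ?_)
  rw [List.mem_range] at ha
  rw [pvFtab_getD d k (by omega : a ≤ p)]

-- ---- pvV facts ----
theorem pvV_empty (d : List Int) (a b : Nat) (h : b + 1 ≤ a) : pvV d a b = 0 := by
  simp [pvV, Nat.sub_eq_zero_of_le h]

theorem pv_getD_nonneg (d : List Int) (hd : ∀ x ∈ d, 0 ≤ x) {q : Nat} (h : q < d.length) :
    0 ≤ d.getD q 0 := by
  rw [List.getD_eq_getElem?_getD, List.getElem?_eq_getElem h]
  exact hd _ (List.getElem_mem h)

theorem pv_foldl_nonneg (l : List Int) (hl : ∀ x ∈ l, 0 ≤ x) :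
    ∀ v : Int, 0 ≤ v → 0 ≤ l.foldl (fun v dg => v * 10 + dg) v := by
  induction l with
  | nil => intro v hv; simpa using hv
  | cons x t ih =>
    intro v hv
    simp only [List.foldl_cons]
    exact ih (fun y hy => hl y (List.mem_cons_of_mem _ hy))
      _ (by have := hl x (List.mem_cons_self ..); nlinarith)

theorem pvV_self (d : List Int) {a : Nat} (h : a < d.length) : pvV d a a = d.getD a 0 := by
  rw [pvV, show a + 1 - a = 1 from by omega, List.drop_eq_getElem_cons h]
  simp only [List.take_succ_cons, List.take_zero, List.foldl_cons, List.foldl_nil]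
  rw [List.getD_eq_getElem?_getD, List.getElem?_eq_getElem h]
  simp

theorem pvV_succ (d : List Int) {a b : Nat} (h1 : a ≤ b + 1) (h2 : b + 1 < d.length) :
    pvV d a (b + 1) = pvV d a b * 10 + d.getD (b + 1) 0 := by
  rw [pvV, pvV, show b + 1 + 1 - a = (b + 1 - a) + 1 from by omega, List.take_add_one]
  have hn : (d.drop a)[b + 1 - a]? = some (d[b + 1]'h2) := by
    rw [List.getElem?_drop, show a + (b + 1 - a) = b + 1 from by omega,
      List.getElem?_eq_getElem h2]
  rw [hn]
  simp [List.foldl_append, List.getD_eq_getElem?_getD, List.getElem?_eq_getElem h2]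

theorem pvV_nonneg (d : List Int) (hd : ∀ x ∈ d, 0 ≤ x) (a b : Nat) : 0 ≤ pvV d a b := by
  refine pv_foldl_nonneg _ (fun x hx => hd x ?_) 0 le_rfl
  exact List.mem_of_mem_drop (List.mem_of_mem_take hx)

theorem pvV_mono (d : List Int) (hd : ∀ x ∈ d, 0 ≤ x) {a j p : Nat}
    (haj : a ≤ j) (hjp : j ≤ p) (hp : p < d.length) : pvV d a j ≤ pvV d a p := by
  induction p, hjp using Nat.le_induction with
  | base => exact le_rfl
  | succ p hjp ih =>
    have hp' : p < d.length := by omega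
    have h1 := pvV_succ d (show a ≤ p + 1 from by omega) hp
    have h2 := pvV_nonneg d hd a p
    have h3 := pv_getD_nonneg d hd hp
    have := ih hp'
    nlinarith

theorem pvV_left (d : List Int) {a b : Nat} (hab : a ≤ b) (hb : b < d.length) :
    pvV d a b = d.getD a 0 * 10 ^ (b - a) + pvV d (a + 1) b := by
  induction b, hab using Nat.le_induction with
  | base =>
    rw [pvV_self d hb, pvV_empty d _ _ (le_refl (a + 1)), Nat.sub_self]
    ring
  | succ b hab ih =>
    have hb' : b < d.length := by omega
    rw [pvV_succ d (by omega) hb, ih hb', pvV_succ d (by omega) hb,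
      show b + 1 - a = (b - a) + 1 from by omega, pow_succ]
    ring

theorem pvV_anti (d : List Int) (hd : ∀ x ∈ d, 0 ≤ x) {a' a b : Nat}
    (h : a' ≤ a) (hab : a ≤ b + 1) (hb : b < d.length) : pvV d a b ≤ pvV d a' b := by
  induction a, h using Nat.le_induction with
  | base => exact le_rfl
  | succ a h ih =>
    have hab' : a ≤ b := by omega
    have h1 := pvV_left d hab' hb
    have h2 := pv_getD_nonneg d hd (show a < d.length from by omega)
    have h3 : (0:Int) ≤ 10 ^ (b - a) := by positivity
    have := ih (by omega)
    nlinarith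

-- ---- B side ----
theorem pvBInner_eq (d : List Int) (k : Int) (dp : List Int) (hd : ∀ x ∈ d, 0 ≤ x)
    {i : Nat} (hi1 : 1 ≤ i) (hi : i ≤ d.length) :
    ∀ st, st ≤ i → ∀ acc, PySem.Int.mod acc 1000000007 = acc →
    pvBInner d k dp st (pvV d st (i - 1)) (10 ^ (i - st)) acc
      = PySem.Int.mod (acc + ((List.range st).map
          (fun a => if d.getD a 0 ≠ 0 ∧ pvV d a (i - 1) ≤ k then dp.getD a 0 else 0)).sum) 1000000007 := by
  intro st
  induction st with
  | zero =>
    intro _ acc hacc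
    simpa [pvBInner] using hacc.symm
  | succ st ih =>
    intro hst acc hacc
    have hlen : i - 1 < d.length := by omega
    have hst' : st ≤ i - 1 := by omega
    have hnum : pvV d (st + 1) (i - 1) + d.getD st 0 * 10 ^ (i - (st + 1))
        = pvV d st (i - 1) := by
      rw [pvV_left d hst' hlen, show i - (st + 1) = i - 1 - st from by omega]; ring
    simp only [pvBInner]
    rw [hnum]
    split_ifs with h hdg
    · -- number already exceeds k: every earlier start position exceeds k as well
      have hz : ∀ x ∈ (List.range (st + 1)).map
          (fun a => if d.getD a 0 ≠ 0 ∧ pvV d a (i - 1) ≤ k then dp.getD a 0 else 0), x = 0 := by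
        intro x hx
        simp only [List.mem_map, List.mem_range] at hx
        obtain ⟨a, ha, rfl⟩ := hx
        have hge : pvV d st (i - 1) ≤ pvV d a (i - 1) :=
          pvV_anti d hd (by omega) (by omega) hlen
        rw [if_neg (by push_neg; intro _; omega)]
      rw [List.sum_eq_zero hz, add_zero, hacc]
    · rw [show (10:Int) ^ (i - (st + 1)) * 10 = 10 ^ (i - st) from by
          rw [show i - st = (i - (st + 1)) + 1 from by omega, pow_succ],
        ih (by omega) acc hacc]
      congr 1
      simp only [List.range_succ, List.map_append, List.sum_append, List.map_cons,
        List.map_nil, List.sum_cons, List.sum_nil]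
      rw [if_neg (fun hc => hc.1 hdg)]
      ring
    · rw [show (10:Int) ^ (i - (st + 1)) * 10 = 10 ^ (i - st) from by
          rw [show i - st = (i - (st + 1)) + 1 from by omega, pow_succ],
        ih (by omega) _ (pvmod_idem _), pvmod_add_left]
      congr 1
      simp only [List.range_succ, List.map_append, List.sum_append, List.map_cons,
        List.map_nil, List.sum_cons, List.sum_nil]
      rw [if_pos ⟨hdg, by omega⟩]
      ring

theorem pvB_fold (d : List Int) (k : Int) (hd : ∀ x ∈ d, 0 ≤ x) :
    ∀ m, m ≤ d.length →
    (List.range' 1 m).foldl (fun dp i => dp ++ [pvBInner d k dp i 0 1 0]) [1] = pvFtab d k m := by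
  intro m
  induction m with
  | zero => intro _; rfl
  | succ m ih =>
    intro hm
    rw [List.range'_concat, List.foldl_append, ih (by omega)]
    simp only [List.foldl_cons, List.foldl_nil, show 1 + 1 * m = m + 1 from by omega]
    have h0 := pvBInner_eq d k (pvFtab d k m) hd (show 1 ≤ m + 1 from by omega) hm
      (m + 1) le_rfl 0 (by simp [pvmod_eq])
    rw [pvV_empty d (m + 1) (m + 1 - 1) (by omega), show (10:Int) ^ ((m+1) - (m+1)) = 1 from by
      rw [Nat.sub_self, pow_zero], zero_add] at h0
    rw [h0]
    rfl

-- ---- A side ----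
theorem pv_getD_set_self (l : List Int) (n : Nat) (a : Int) (h : n < l.length) :
    (l.set n a).getD n 0 = a := by
  simp [List.getD_eq_getElem?_getD, h]

theorem pv_getD_set_ne (l : List Int) (m n : Nat) (a : Int) (h : m ≠ n) :
    (l.set m a).getD n 0 = l.getD n 0 := by
  simp [List.getD_eq_getElem?_getD, List.getElem?_set_ne h]

theorem pvAInner_getD (d : List Int) (k : Int) (hd : ∀ x ∈ d, 0 ≤ x)
    {i : Nat} (hi1 : 1 ≤ i) :
    ∀ fuel j dp, (d.length + 1) - j ≤ fuel → i ≤ j → dp.length = d.length + 1 →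
    ∀ p, (pvAInner (0 :: d) k (d.length + 1) i j (pvV d (i - 1) (j - 1)) dp).getD p 0
      = if j ≤ p ∧ p < d.length + 1 ∧ pvV d (i - 1) (p - 1) ≤ k
        then PySem.Int.mod (dp.getD p 0 + dp.getD (i - 1) 0) 1000000007
        else dp.getD p 0 := by
  intro fuel
  induction fuel with
  | zero =>
    intro j dp hf hij hlen p
    rw [pvAInner, dif_neg (by intro hc; omega), if_neg (by omega)]
  | succ fuel ih =>
    intro j dp hf hij hlen p
    have hj1 : 1 ≤ j := le_trans hi1 hij
    rw [pvAInner]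
    by_cases h1 : pvV d (i - 1) (j - 1) ≤ k ∧ j < d.length + 1
    · rw [dif_pos h1]
      dsimp only
      by_cases h2 : j + 1 ≥ d.length + 1
      · rw [dif_pos h2]
        by_cases hpj : p = j
        · rw [hpj, pv_getD_set_self dp j _ (by omega), if_pos ⟨le_rfl, by omega, h1.1⟩]
        · rw [pv_getD_set_ne dp j p _ (fun h => hpj h.symm), if_neg (by omega)]
      · rw [dif_neg h2]
        have hv' : pvV d (i - 1) (j - 1) * 10 + (0 :: d).getD (j + 1) 0
            = pvV d (i - 1) ((j + 1) - 1) := by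
          rw [List.getD_cons_succ, show (j + 1) - 1 = (j - 1) + 1 from by omega,
            pvV_succ d (by omega) (by omega), show (j - 1) + 1 = j from by omega]
        rw [hv', ih (j + 1) _ (by omega) (by omega) (by simp [hlen])]
        have hdpni : (dp.set j (PySem.Int.mod (dp.getD j 0 + dp.getD (i - 1) 0) 1000000007)).getD (i - 1) 0
            = dp.getD (i - 1) 0 := pv_getD_set_ne dp j (i - 1) _ (by omega)
        by_cases hpj : p = j
        · rw [hpj, if_neg (by omega), pv_getD_set_self dp j _ (by omega),
            if_pos ⟨le_rfl, by omega, h1.1⟩]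
        · rw [pv_getD_set_ne dp j p _ (fun h => hpj h.symm), hdpni]
          by_cases hc : j ≤ p ∧ p < d.length + 1 ∧ pvV d (i - 1) (p - 1) ≤ k
          · rw [if_pos ⟨by omega, hc.2.1, hc.2.2⟩, if_pos hc]
          · rw [if_neg (fun hx => hc ⟨by omega, hx.2.1, hx.2.2⟩), if_neg hc]
    · rw [dif_neg h1, if_neg ?_]
      rintro ⟨hjp, hpn, hV⟩
      rcases not_and_or.mp h1 with hv | hn
      · have := pvV_mono d hd (show i - 1 ≤ j - 1 from by omega)
          (show j - 1 ≤ p - 1 from by omega) (show p - 1 < d.length from by omega)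
        omega
      · omega

theorem pvAInner_length (t : List Int) (k : Int) (n i : Nat) :
    ∀ fuel j val dp, n - j ≤ fuel → (pvAInner t k n i j val dp).length = dp.length := by
  intro fuel
  induction fuel with
  | zero =>
    intro j val dp hf
    rw [pvAInner, dif_neg (by intro hc; omega)]
  | succ fuel ih =>
    intro j val dp hf
    rw [pvAInner]
    split_ifs with h1 h2
    · exact List.length_set ..
    · rw [ih (j + 1) _ _ (by omega)]
      exact List.length_set ..
    · rfl

-- invariant of A's outer loop after the iterations i = 1..m
def pvAInv (d : List Int) (k : Int) (m : Nat) (dp : List Int) : Prop :=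
  dp.length = d.length + 1 ∧ dp.getD 0 0 = 1 ∧
  ∀ p, 1 ≤ p → p < d.length + 1 →
    dp.getD p 0 = PySem.Int.mod (((List.range (min p m)).map
      (fun a => if d.getD a 0 ≠ 0 ∧ pvV d a (p - 1) ≤ k then pvF d k a else 0)).sum) 1000000007

theorem pvA_fold (d : List Int) (k : Int) (hd : ∀ x ∈ d, 0 ≤ x) :
    ∀ m, m ≤ d.length →
    pvAInv d k m ((List.range' 1 m).foldl (fun dp i =>
      if dp.getD (i - 1) 0 = 0 ∨ (0 :: d).getD i 0 = 0 then dp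
      else pvAInner (0 :: d) k (d.length + 1) i i ((0 :: d).getD i 0) dp)
      ((List.replicate (d.length + 1) (0 : Int)).set 0 1)) := by
  intro m
  induction m with
  | zero =>
    intro _
    rw [show List.range' 1 0 = ([] : List Nat) from rfl, List.foldl_nil]
    refine ⟨by simp, by rw [pv_getD_set_self _ 0 _ (by simp)], ?_⟩
    intro p hp1 hpn
    rw [pv_getD_set_ne _ 0 p _ (by omega)]
    simp [pvmod_eq, List.getD_eq_getElem?_getD, List.getElem?_replicate,
      show p < d.length + 1 from by omega]
  | succ m ih =>
    intro hm
    obtain ⟨hlen, h0, hp⟩ := ih (by omega)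
    rw [List.range'_concat, List.foldl_append, List.foldl_cons, List.foldl_nil,
      show 1 + 1 * m = m + 1 from by omega]
    have hFm : ((List.range' 1 m).foldl (fun dp i =>
        if dp.getD (i - 1) 0 = 0 ∨ (0 :: d).getD i 0 = 0 then dp
        else pvAInner (0 :: d) k (d.length + 1) i i ((0 :: d).getD i 0) dp)
        ((List.replicate (d.length + 1) (0 : Int)).set 0 1)).getD (m + 1 - 1) 0 = pvF d k m := by
      cases m with
      | zero => exact h0
      | succ q =>
        rw [show q + 1 + 1 - 1 = q + 1 from rfl, hp (q + 1) (by omega) (by omega),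
          Nat.min_self, pvF_succ]
        simp only [Nat.add_sub_cancel]
    by_cases hskip : ((List.range' 1 m).foldl (fun dp i =>
        if dp.getD (i - 1) 0 = 0 ∨ (0 :: d).getD i 0 = 0 then dp
        else pvAInner (0 :: d) k (d.length + 1) i i ((0 :: d).getD i 0) dp)
        ((List.replicate (d.length + 1) (0 : Int)).set 0 1)).getD (m + 1 - 1) 0 = 0 ∨ (0 :: d).getD (m + 1) 0 = 0
    · rw [if_pos hskip]
      refine ⟨hlen, h0, ?_⟩
      intro p hp1 hpn
      rw [hp p hp1 hpn]
      congr 1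
      by_cases hpm : p ≤ m
      · rw [show min p (m + 1) = min p m from by omega]
      · rw [show min p m = m from by omega, show min p (m + 1) = m + 1 from by omega,
          List.range_succ, List.map_append, List.sum_append]
        simp only [List.map_cons, List.map_nil, List.sum_cons, List.sum_nil, add_zero]
        have hz : (if d.getD m 0 ≠ 0 ∧ pvV d m (p - 1) ≤ k then pvF d k m else 0) = 0 := by
          rcases hskip with hz | hz
          · rw [hFm] at hz
            split_ifs with hif
            · exact hz
            · rfl
          · rw [List.getD_cons_succ] at hz
            rw [if_neg (fun hx => hx.1 hz)]
        rw [hz]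
        simp
    · rw [if_neg hskip]
      have hnot := not_or.mp hskip
      have hdig : d.getD m 0 ≠ 0 := by
        have := hnot.2
        rwa [List.getD_cons_succ] at this
      have hval : (0 :: d).getD (m + 1) 0 = pvV d (m + 1 - 1) (m + 1 - 1) := by
        rw [List.getD_cons_succ, show m + 1 - 1 = m from rfl,
          pvV_self d (show m < d.length from by omega)]
      rw [hval]
      have hkey := pvAInner_getD d k hd (show 1 ≤ m + 1 from by omega) (d.length + 1) (m + 1)
        ((List.range' 1 m).foldl (fun dp i =>
          if dp.getD (i - 1) 0 = 0 ∨ (0 :: d).getD i 0 = 0 then dp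
          else pvAInner (0 :: d) k (d.length + 1) i i ((0 :: d).getD i 0) dp)
          ((List.replicate (d.length + 1) (0 : Int)).set 0 1)) (by omega) le_rfl hlen
      have hlen' := pvAInner_length (0 :: d) k (d.length + 1) (m + 1) (d.length + 1) (m + 1)
        (pvV d (m + 1 - 1) (m + 1 - 1)) ((List.range' 1 m).foldl (fun dp i =>
          if dp.getD (i - 1) 0 = 0 ∨ (0 :: d).getD i 0 = 0 then dp
          else pvAInner (0 :: d) k (d.length + 1) i i ((0 :: d).getD i 0) dp)
          ((List.replicate (d.length + 1) (0 : Int)).set 0 1)) (by omega)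
      refine ⟨by rw [hlen']; exact hlen, ?_, ?_⟩
      · rw [hkey 0, if_neg (by omega)]
        exact h0
      · intro p hp1 hpn
        rw [hkey p]
        by_cases hc : m + 1 ≤ p ∧ p < d.length + 1 ∧ pvV d (m + 1 - 1) (p - 1) ≤ k
        · rw [if_pos hc, hFm, hp p hp1 hpn, pvmod_add_left,
            show min p m = m from by omega, show min p (m + 1) = m + 1 from by omega,
            List.range_succ, List.map_append, List.sum_append]
          simp only [List.map_cons, List.map_nil, List.sum_cons, List.sum_nil, add_zero]
          have : (if d.getD m 0 ≠ 0 ∧ pvV d m (p - 1) ≤ k then pvF d k m else 0) = pvF d k m :=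
            if_pos ⟨hdig, hc.2.2⟩
          rw [this]
        · rw [if_neg hc, hp p hp1 hpn]
          congr 1
          by_cases hpm : p ≤ m
          · rw [show min p (m + 1) = min p m from by omega]
          · have hV : ¬ pvV d (m + 1 - 1) (p - 1) ≤ k := fun hV => hc ⟨by omega, by omega, hV⟩
            rw [show min p m = m from by omega, show min p (m + 1) = m + 1 from by omega,
              List.range_succ, List.map_append, List.sum_append]
            simp only [List.map_cons, List.map_nil, List.sum_cons, List.sum_nil, add_zero]
            rw [show (if d.getD m 0 ≠ 0 ∧ pvV d m (p - 1) ≤ k then pvF d k m else 0) = 0 from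
                if_neg (fun hx => hV hx.2)]
            simp

theorem pv_digits_nonneg (s : String) (hs : s.toList.all Char.isDigit = true) :
    ∀ x ∈ s.toList.map (fun c => ((c.toNat : Int) - 48)), 0 ≤ x := by
  intro x hx
  simp only [List.mem_map] at hx
  obtain ⟨c, hc, rfl⟩ := hx
  have := (List.all_eq_true.mp hs) c hc
  simp [Char.isDigit, UInt32.le_iff_toNat_le] at this
  omega

theorem pvA_eq_F (s : String) (k : Int) (hs : s.toList.all Char.isDigit = true) :
    numberOfArrays s k = pvF (s.toList.map (fun c => ((c.toNat : Int) - 48))) k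
      (s.toList.map (fun c => ((c.toNat : Int) - 48))).length := by
  have hd := pv_digits_nonneg s hs
  obtain ⟨hlen, h0, hp⟩ := pvA_fold (s.toList.map (fun c => ((c.toNat : Int) - 48))) k hd
    (s.toList.map (fun c => ((c.toNat : Int) - 48))).length le_rfl
  simp only [numberOfArrays, List.length_cons, Nat.add_sub_cancel]
  rcases Nat.eq_zero_or_pos (s.toList.map (fun c => ((c.toNat : Int) - 48))).length with hz | hpos
  · rw [hz]
    rfl
  · obtain ⟨q, hq⟩ : ∃ q, (s.toList.map (fun c => ((c.toNat : Int) - 48))).length = q + 1 :=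
      ⟨(s.toList.map (fun c => ((c.toNat : Int) - 48))).length - 1, by omega⟩
    rw [hp _ (by omega) (by omega), Nat.min_self, hq, pvF_succ]
    simp only [Nat.add_sub_cancel]

theorem pvB_eq_F (s : String) (k : Int) (hs : s.toList.all Char.isDigit = true) :
    numberOfArrays_alt s k = pvF (s.toList.map (fun c => ((c.toNat : Int) - 48))) k
      (s.toList.map (fun c => ((c.toNat : Int) - 48))).length := by
  have hd := pv_digits_nonneg s hs
  simp only [numberOfArrays_alt]
  rw [pvB_fold _ k hd _ le_rfl]
  rfl

-- ===== VERDICT (by name: the statement is the Claim_ definition above) =====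
theorem numberOfArrays_spec : Claim_equal_numberOfArrays := by
  intro s k _ hpre
  unfold Spec_numberOfArrays
  rw [pvA_eq_F s k hpre, pvB_eq_F s k hpre]
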